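-- pv_equiv track=rewrite | github.com/jt113/watermark-remover | temporal_vid_edit/ffmpeg_delogo.py | _group_frames
-- ===== SOURCE A (Python) =====
-- from typing import Iterable, List, Sequence, Tuple
--
-- def _group_frames(frames: Sequence[int]) -> List[Tuple[int, int]]:
--     if not frames:
--         return []
--     sorted_frames = sorted(set(frames))
--     grouped: List[Tuple[int, int]] = []
--     start = prev = sorted_frames[0]
--     for frame in sorted_frames[1:]:
--         if frame == prev + 1:
--             prev = frame
--             continue
--         grouped.append((start, prev))
--         start = prev = frame
--     grouped.append((start, prev))
--     return grouped
-- ===== SOURCE B (Python) =====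
-- def _group_frames(frames):
--     s = set(frames)
--     starts = sorted(x for x in s if x - 1 not in s)
--     ends = sorted(x for x in s if x + 1 not in s)
--     return list(zip(starts, ends))
-- ===== Notes on version B (the rewrite author's own statement) =====
-- stated objective: alternative
-- what changed: Replaces the sorted-scan that tracks start/prev with boundary detection by set membership: run starts are elements x with x-1 not in the set, run ends those with x+1 not in the set, sorted separately and zipped.
import Mathlib
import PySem

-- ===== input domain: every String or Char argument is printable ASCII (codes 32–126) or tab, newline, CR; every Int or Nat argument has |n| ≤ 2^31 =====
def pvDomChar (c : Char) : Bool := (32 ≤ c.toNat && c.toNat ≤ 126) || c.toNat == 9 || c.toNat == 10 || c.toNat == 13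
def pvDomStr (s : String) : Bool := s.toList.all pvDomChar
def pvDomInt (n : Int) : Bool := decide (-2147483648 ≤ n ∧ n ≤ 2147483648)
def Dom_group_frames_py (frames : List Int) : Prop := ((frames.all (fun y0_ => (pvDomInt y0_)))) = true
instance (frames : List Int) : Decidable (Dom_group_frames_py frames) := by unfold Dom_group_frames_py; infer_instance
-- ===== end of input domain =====

-- B groups consecutive runs by set-membership boundary detection instead of A's sorted scan with a prev tracker; same cost class, different algorithm.

-- ===== PORT A =====
def group_frames_py (frames : List Int) : List (Int × Int) :=
  if frames = [] then []
  else
    let sorted_frames := PySem.List.sorted (PySem.Set.ofList frames) (fun x => x) false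
    match sorted_frames with
    | [] => []  -- unreachable: sorted(set(frames)) of nonempty frames is nonempty
    | x :: rest =>
      let st := rest.foldl
        (fun (s : List (Int × Int) × Int × Int) frame =>
          if frame = s.2.2 + 1 then (s.1, s.2.1, frame)
          else (s.1 ++ [(s.2.1, s.2.2)], frame, frame))
        ([], x, x)
      st.1 ++ [(st.2.1, st.2.2)]

-- ===== PORT B =====
def group_frames_py_alt (frames : List Int) : List (Int × Int) :=
  let s := PySem.Set.ofList frames
  let starts := PySem.List.sorted (s.filter (fun x => !(s.contains (x - 1)))) (fun x => x) false
  let ends := PySem.List.sorted (s.filter (fun x => !(s.contains (x + 1)))) (fun x => x) false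
  starts.zip ends

-- ===== PRECONDITION & SPEC =====
def Spec_group_frames_py (frames : List Int) (out : List (Int × Int)) : Prop := out = group_frames_py_alt frames
instance (frames : List Int) (out : List (Int × Int)) : Decidable (Spec_group_frames_py frames out) := by unfold Spec_group_frames_py; infer_instance

-- ===== CLAIM (what is proved, stated in full; the proofs are below) =====
def Claim_equal_group_frames_py : Prop := ∀ (frames : List Int), Dom_group_frames_py frames → Spec_group_frames_py frames (group_frames_py frames)

-- ===== LEMMAS AND PROOFS =====

-- A's loop as a structural recursion on the remaining (sorted) frames.
def pvRuns (start prev : Int) : List Int → List (Int × Int)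
  | [] => [(start, prev)]
  | f :: rs => if f = prev + 1 then pvRuns start f rs else (start, prev) :: pvRuns f f rs

-- the non-head run starts of a sorted tail, given the previous element
def pvStartsRest (prev : Int) : List Int → List Int
  | [] => []
  | b :: t => if b = prev + 1 then pvStartsRest b t else b :: pvStartsRest b t

-- the run ends of a sorted list
def pvEndsL : List Int → List Int
  | [] => []
  | [a] => [a]
  | a :: b :: t => if b = a + 1 then pvEndsL (b :: t) else a :: pvEndsL (b :: t)

lemma pvFoldl_runs (rest : List Int) : ∀ (acc : List (Int × Int)) (start prev : Int),
    (let st := rest.foldl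
        (fun (s : List (Int × Int) × Int × Int) frame =>
          if frame = s.2.2 + 1 then (s.1, s.2.1, frame)
          else (s.1 ++ [(s.2.1, s.2.2)], frame, frame))
        (acc, start, prev)
     st.1 ++ [(st.2.1, st.2.2)]) = acc ++ pvRuns start prev rest := by
  induction rest with
  | nil => intro acc start prev; simp [pvRuns]
  | cons f rs ih =>
    intro acc start prev
    simp only [List.foldl_cons, pvRuns]
    by_cases h : f = prev + 1
    · simp [h, ih]
    · simp [h, ih, List.append_assoc]

lemma pvRuns_zip (rest : List Int) : ∀ (start prev : Int),
    pvRuns start prev rest = (start :: pvStartsRest prev rest).zip (pvEndsL (prev :: rest)) := by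
  induction rest with
  | nil => intro start prev; simp [pvRuns, pvStartsRest, pvEndsL]
  | cons f rs ih =>
    intro start prev
    by_cases h : f = prev + 1
    · simp [pvRuns, pvStartsRest, pvEndsL, h, ih]
    · simp [pvRuns, pvStartsRest, pvEndsL, h, ih, List.zip_cons_cons]

lemma pvEnds_suffix (full : List Int) (hfull : full.Pairwise (· < ·)) :
    ∀ l : List Int, l <:+ full → l.filter (fun y => !(decide ((y + 1) ∈ full))) = pvEndsL l := by
  intro l
  induction l with
  | nil => intro _; simp [pvEndsL]
  | cons a t ih =>
    intro hsuf
    obtain ⟨pre, hpre⟩ := hsuf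
    have hpair : (pre ++ a :: t).Pairwise (· < ·) := hpre ▸ hfull
    rw [List.pairwise_append] at hpair
    obtain ⟨-, hlt, hcross⟩ := hpair
    match t with
    | [] =>
      have hnot : (a + 1) ∉ full := by
        rw [← hpre]
        intro hm
        rcases List.mem_append.mp hm with h1 | h1
        · have := hcross _ h1 a (by simp); omega
        · simp at h1
      simp [pvEndsL, List.filter, hnot]
    | b :: t' =>
      have hsuf' : (b :: t') <:+ full := ⟨pre ++ [a], by simp [← hpre]⟩
      have hab : a < b := (List.pairwise_cons.mp hlt).1 b (by simp)
      have hmem : (a + 1) ∈ full ↔ b = a + 1 := by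
        constructor
        · intro hm
          rw [← hpre] at hm
          rcases List.mem_append.mp hm with h1 | h1
          · have := hcross _ h1 a (by simp); omega
          · rcases List.mem_cons.mp h1 with h2 | h2
            · omega
            · rcases List.mem_cons.mp h2 with h3 | h3
              · omega
              · have hbt := (List.pairwise_cons.mp (List.pairwise_cons.mp hlt).2).1 _ h3
                omega
        · intro hb
          rw [← hpre]; simp [← hb]
      by_cases h : b = a + 1
      · rw [List.filter_cons, ih hsuf']
        have hin : (a + 1) ∈ full := hmem.mpr h
        simp [pvEndsL, h, hin]
      · rw [List.filter_cons, ih hsuf']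
        have hout : (a + 1) ∉ full := fun hm => h (hmem.mp hm)
        simp [pvEndsL, h, hout]

lemma pvStarts_suffix (full : List Int) (hfull : full.Pairwise (· < ·)) :
    ∀ (t : List Int) (prev : Int), (prev :: t) <:+ full →
      t.filter (fun y => !(decide ((y - 1) ∈ full))) = pvStartsRest prev t := by
  intro t
  induction t with
  | nil => intro _ _; simp [pvStartsRest]
  | cons b t' ih =>
    intro prev hsuf
    obtain ⟨pre, hpre⟩ := hsuf
    have hpair : (pre ++ prev :: b :: t').Pairwise (· < ·) := hpre ▸ hfull
    rw [List.pairwise_append] at hpair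
    obtain ⟨-, hlt, hcross⟩ := hpair
    have hpb : prev < b := (List.pairwise_cons.mp hlt).1 b (by simp)
    have hsuf' : (b :: t') <:+ full := ⟨pre ++ [prev], by simp [← hpre]⟩
    have hmem : (b - 1) ∈ full ↔ b = prev + 1 := by
      constructor
      · intro hm
        rw [← hpre] at hm
        rcases List.mem_append.mp hm with h1 | h1
        · have := hcross _ h1 prev (by simp); omega
        · rcases List.mem_cons.mp h1 with h2 | h2
          · omega
          · rcases List.mem_cons.mp h2 with h3 | h3
            · omega
            · have hbt := (List.pairwise_cons.mp (List.pairwise_cons.mp hlt).2).1 _ h3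
              omega
      · intro hb
        rw [← hpre]; simp; omega
    by_cases h : b = prev + 1
    · rw [List.filter_cons, ih b hsuf']
      have hprevmem : prev ∈ full := by rw [← hpre]; simp
      simp [pvStartsRest, h, hprevmem]
    · rw [List.filter_cons, ih b hsuf']
      have hout : (b - 1) ∉ full := fun hm => h (hmem.mp hm)
      simp [pvStartsRest, h, hout]

-- sorted of a filtered list equals the filter applied to the (strictly increasing) sorted list
lemma pvSorted_filter (s : List Int) (p : Int → Bool)
    (hs : (PySem.List.sorted s (fun x => x) false).Pairwise (· < ·)) :
    PySem.List.sorted (s.filter p) (fun x => x) false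
      = (PySem.List.sorted s (fun x => x) false).filter p := by
  apply PySem.List.sorted_eq_of_perm_of_pairwise_lt
  · exact (PySem.List.sorted_perm s (fun x => x) false).filter p
  · exact hs.filter p

-- ===== VERDICT (by name: the statement is the Claim_ definition above) =====
theorem group_frames_py_spec : Claim_equal_group_frames_py := by
  intro frames _
  show group_frames_py frames = group_frames_py_alt frames
  by_cases hnil : frames = []
  · subst hnil; rfl
  · obtain ⟨x, rest, hxr⟩ : ∃ x rest,
        PySem.List.sorted (PySem.Set.ofList frames) (fun x => x) false = x :: rest := by
      rcases hys : PySem.List.sorted (PySem.Set.ofList frames) (fun x => x) false with _ | ⟨x, rest⟩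
      · rw [PySem.List.sorted_eq_nil_iff] at hys
        rcases frames with _ | ⟨f, fs⟩
        · exact absurd rfl hnil
        · have : f ∈ PySem.Set.ofList (f :: fs) := by
            rw [PySem.Set.mem_ofList]; simp
          rw [hys] at this; simp at this
      · exact ⟨x, rest, rfl⟩
    have hpw : (x :: rest).Pairwise (· < ·) :=
      hxr ▸ PySem.List.sorted_ofList_pairwise_lt (xs := frames)
    have hmemiff : ∀ z : Int, (z ∈ PySem.Set.ofList frames) ↔ z ∈ (x :: rest) := by
      intro z
      rw [← hxr]
      exact (PySem.List.sorted_perm _ _ _).mem_iff.symm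
    -- B side: sorted(filter) = filter(sorted), then localize the membership tests
    have hstarts :
        PySem.List.sorted ((PySem.Set.ofList frames).filter
            (fun y => !((PySem.Set.ofList frames).contains (y - 1)))) (fun x => x) false
          = x :: pvStartsRest x rest := by
      rw [pvSorted_filter _ _ (by rw [hxr]; exact hpw), hxr]
      have hcong : (x :: rest).filter (fun y => !((PySem.Set.ofList frames).contains (y - 1)))
          = (x :: rest).filter (fun y => !(decide ((y - 1) ∈ (x :: rest)))) := by
        apply List.filter_congr
        intro y _
        simp [hmemiff]
      rw [hcong, List.filter_cons]
      have hxnot : (x - 1) ∉ (x :: rest) := by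
        intro hm
        rcases List.mem_cons.mp hm with h2 | h2
        · omega
        · have := (List.pairwise_cons.mp hpw).1 _ h2; omega
      simp only [hxnot, decide_false, Bool.not_false, if_pos]
      rw [pvStarts_suffix (x :: rest) hpw rest x List.suffix_rfl]
    have hends :
        PySem.List.sorted ((PySem.Set.ofList frames).filter
            (fun y => !((PySem.Set.ofList frames).contains (y + 1)))) (fun x => x) false
          = pvEndsL (x :: rest) := by
      rw [pvSorted_filter _ _ (by rw [hxr]; exact hpw), hxr]
      have hcong : (x :: rest).filter (fun y => !((PySem.Set.ofList frames).contains (y + 1)))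
          = (x :: rest).filter (fun y => !(decide ((y + 1) ∈ (x :: rest)))) := by
        apply List.filter_congr
        intro y _
        simp [hmemiff]
      rw [hcong]
      exact pvEnds_suffix (x :: rest) hpw (x :: rest) List.suffix_rfl
    unfold group_frames_py group_frames_py_alt
    rw [if_neg hnil]
    simp only [hxr, hstarts, hends]
    rw [pvFoldl_runs rest [] x x, List.nil_append, pvRuns_zip]
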